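-- pv_equiv track=rewrite | github.com/radheyashetty/nifty50-prediction-system | backend/utils.py | get_ticker_sector
-- ===== SOURCE A (Python) =====
-- from typing import Any, Dict, Tuple
--
-- def get_nse_sector_map() -> Dict[str, list[str]]:
--     """Return sector-to-ticker map used by screener and sector analysis."""
--     return {
--         "Information Technology": [
--             "TCS.NS",
--             "INFY.NS",
--             "WIPRO.NS",
--             "HCLTECH.NS",
--             "TECHM.NS",
--         ],
--         "Banking & Financial Services": [
--             "HDFCBANK.NS",
--             "ICICIBANK.NS",
--             "SBIN.NS",
--             "KOTAKBANK.NS",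
--             "AXISBANK.NS",
--         ],
--         "Insurance & NBFC": [
--             "HDFCLIFE.NS",
--             "SBILIFE.NS",
--             "BAJFINANCE.NS",
--             "BAJAJFINSV.NS",
--         ],
--         "Pharmaceuticals": [
--             "SUNPHARMA.NS",
--             "CIPLA.NS",
--             "DIVISLAB.NS",
--             "DRREDDY.NS",
--         ],
--         "Consumer Goods (FMCG)": [
--             "HINDUNILVR.NS",
--             "ITC.NS",
--             "NESTLEIND.NS",
--             "BRITANNIA.NS",
--             "TATACONSUM.NS",
--         ],
--         "Automobile": [
--             "MARUTI.NS",
--             "TATAMOTORS.NS",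
--             "EICHERMOT.NS",
--             "HEROMOTOCO.NS",
--             "BAJAJ-AUTO.NS",
--             "M&M.NS",
--         ],
--         "Energy & Oil/Gas": [
--             "RELIANCE.NS",
--             "ONGC.NS",
--             "BPCL.NS",
--         ],
--         "Metals & Mining": [
--             "TATASTEEL.NS",
--             "JSWSTEEL.NS",
--             "HINDALCO.NS",
--             "COALINDIA.NS",
--         ],
--         "Infrastructure & Cement": [
--             "ULTRACEMCO.NS",
--             "GRASIM.NS",
--             "ADANIPORTS.NS",
--             "ADANIENT.NS",
--             "LT.NS",
--         ],
--         "Power & Utilities": [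
--             "NTPC.NS",
--             "POWERGRID.NS",
--         ],
--         "Telecom": [
--             "BHARTIARTL.NS",
--             "INDUSINDBK.NS",
--         ],
--         "Healthcare & Hospitals": [
--             "APOLLOHOSP.NS",
--         ],
--         "Consumer & Retail": [
--             "TITAN.NS",
--             "ASIANPAINT.NS",
--             "UPL.NS",
--         ],
--     }
--
-- def get_ticker_sector(ticker: str) -> str:
--     """Return sector name for a ticker or 'Unknown'."""
--     symbol = str(ticker or "").strip().upper()
--     base_symbol = symbol.split(".")[0]
--     for sector, tickers in get_nse_sector_map().items():
--         for candidate in tickers: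
--             cand = str(candidate).strip().upper()
--             if symbol == cand or base_symbol == cand.split(".")[0]:
--                 return sector
--     return "Unknown"
-- ===== SOURCE B (Python) =====
-- """Reverse lookup table: base symbol -> sector (precomputed constant)."""
--
-- _SECTOR_BY_BASE = {
--     "TCS": "Information Technology",
--     "INFY": "Information Technology",
--     "WIPRO": "Information Technology",
--     "HCLTECH": "Information Technology",
--     "TECHM": "Information Technology",
--     "HDFCBANK": "Banking & Financial Services",
--     "ICICIBANK": "Banking & Financial Services",
--     "SBIN": "Banking & Financial Services",
--     "KOTAKBANK": "Banking & Financial Services",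
--     "AXISBANK": "Banking & Financial Services",
--     "HDFCLIFE": "Insurance & NBFC",
--     "SBILIFE": "Insurance & NBFC",
--     "BAJFINANCE": "Insurance & NBFC",
--     "BAJAJFINSV": "Insurance & NBFC",
--     "SUNPHARMA": "Pharmaceuticals",
--     "CIPLA": "Pharmaceuticals",
--     "DIVISLAB": "Pharmaceuticals",
--     "DRREDDY": "Pharmaceuticals",
--     "HINDUNILVR": "Consumer Goods (FMCG)",
--     "ITC": "Consumer Goods (FMCG)",
--     "NESTLEIND": "Consumer Goods (FMCG)",
--     "BRITANNIA": "Consumer Goods (FMCG)",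
--     "TATACONSUM": "Consumer Goods (FMCG)",
--     "MARUTI": "Automobile",
--     "TATAMOTORS": "Automobile",
--     "EICHERMOT": "Automobile",
--     "HEROMOTOCO": "Automobile",
--     "BAJAJ-AUTO": "Automobile",
--     "M&M": "Automobile",
--     "RELIANCE": "Energy & Oil/Gas",
--     "ONGC": "Energy & Oil/Gas",
--     "BPCL": "Energy & Oil/Gas",
--     "TATASTEEL": "Metals & Mining",
--     "JSWSTEEL": "Metals & Mining",
--     "HINDALCO": "Metals & Mining",
--     "COALINDIA": "Metals & Mining",
--     "ULTRACEMCO": "Infrastructure & Cement",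
--     "GRASIM": "Infrastructure & Cement",
--     "ADANIPORTS": "Infrastructure & Cement",
--     "ADANIENT": "Infrastructure & Cement",
--     "LT": "Infrastructure & Cement",
--     "NTPC": "Power & Utilities",
--     "POWERGRID": "Power & Utilities",
--     "BHARTIARTL": "Telecom",
--     "INDUSINDBK": "Telecom",
--     "APOLLOHOSP": "Healthcare & Hospitals",
--     "TITAN": "Consumer & Retail",
--     "ASIANPAINT": "Consumer & Retail",
--     "UPL": "Consumer & Retail",
-- }
--
--
-- def get_ticker_sector(ticker: str) -> str:
--     """Return sector name for a ticker or 'Unknown'."""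
--     symbol = str(ticker or "").strip().upper()
--     base_symbol = symbol.split(".")[0]
--     return _SECTOR_BY_BASE.get(base_symbol, "Unknown")
-- ===== Notes on version B (the rewrite author's own statement) =====
-- stated objective: simpler
-- what changed: Replaces A's per-call nested scan over the sector map (strip/upper/split on every candidate) by a precomputed flat base-symbol-to-sector table and a single dict lookup after normalizing the input.
import Mathlib
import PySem

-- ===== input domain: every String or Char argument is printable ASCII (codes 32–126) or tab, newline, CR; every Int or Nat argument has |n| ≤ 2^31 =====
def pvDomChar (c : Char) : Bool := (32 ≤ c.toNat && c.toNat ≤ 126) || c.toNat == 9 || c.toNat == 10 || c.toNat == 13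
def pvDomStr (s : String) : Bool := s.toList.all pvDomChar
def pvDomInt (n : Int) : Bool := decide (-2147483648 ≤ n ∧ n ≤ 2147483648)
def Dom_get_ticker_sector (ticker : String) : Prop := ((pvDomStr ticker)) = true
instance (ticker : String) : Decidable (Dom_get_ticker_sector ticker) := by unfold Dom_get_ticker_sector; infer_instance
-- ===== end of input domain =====

-- B replaces A's per-call nested scan over the sector map by a precomputed flat
-- base-symbol -> sector table and a single dictionary lookup; same result on every input.

-- ===== PORT A =====
-- s.split(".")[0]: split with a non-empty separator always succeeds and is never empty,
-- so [0] is the head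
def pvBase (s : String) : String := ((PySem.Str.split? s ".").getD []).headD ""

-- get_nse_sector_map() of A (a pure literal)
def pvSectorMap : List (String × List String) :=
  [ ("Information Technology", ["TCS.NS", "INFY.NS", "WIPRO.NS", "HCLTECH.NS", "TECHM.NS"]),
    ("Banking & Financial Services", ["HDFCBANK.NS", "ICICIBANK.NS", "SBIN.NS", "KOTAKBANK.NS", "AXISBANK.NS"]),
    ("Insurance & NBFC", ["HDFCLIFE.NS", "SBILIFE.NS", "BAJFINANCE.NS", "BAJAJFINSV.NS"]),
    ("Pharmaceuticals", ["SUNPHARMA.NS", "CIPLA.NS", "DIVISLAB.NS", "DRREDDY.NS"]),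
    ("Consumer Goods (FMCG)", ["HINDUNILVR.NS", "ITC.NS", "NESTLEIND.NS", "BRITANNIA.NS", "TATACONSUM.NS"]),
    ("Automobile", ["MARUTI.NS", "TATAMOTORS.NS", "EICHERMOT.NS", "HEROMOTOCO.NS", "BAJAJ-AUTO.NS", "M&M.NS"]),
    ("Energy & Oil/Gas", ["RELIANCE.NS", "ONGC.NS", "BPCL.NS"]),
    ("Metals & Mining", ["TATASTEEL.NS", "JSWSTEEL.NS", "HINDALCO.NS", "COALINDIA.NS"]),
    ("Infrastructure & Cement", ["ULTRACEMCO.NS", "GRASIM.NS", "ADANIPORTS.NS", "ADANIENT.NS", "LT.NS"]),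
    ("Power & Utilities", ["NTPC.NS", "POWERGRID.NS"]),
    ("Telecom", ["BHARTIARTL.NS", "INDUSINDBK.NS"]),
    ("Healthcare & Hospitals", ["APOLLOHOSP.NS"]),
    ("Consumer & Retail", ["TITAN.NS", "ASIANPAINT.NS", "UPL.NS"]) ]

-- inner 'for candidate in tickers' loop of A (returning from the loop = returning true here)
def pvInnerA (symbol base : String) : List String → Bool
  | [] => false
  | c :: cs =>
      let cand := PySem.Str.upper (PySem.Str.strip c)
      if symbol == cand || base == pvBase cand then true
      else pvInnerA symbol base cs

-- outer 'for sector, tickers in …' loop of A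
def pvLoopA (symbol base : String) : List (String × List String) → String
  | [] => "Unknown"
  | (sector, tickers) :: rest =>
      if pvInnerA symbol base tickers then sector else pvLoopA symbol base rest

def get_ticker_sector (ticker : String) : String :=
  -- str(ticker or "") : a falsy (empty) string becomes "", i.e. stays itself
  let symbol := PySem.Str.upper (PySem.Str.strip (if ticker == "" then "" else ticker))
  let base_symbol := pvBase symbol
  pvLoopA symbol base_symbol pvSectorMap

-- ===== PORT B =====
-- _SECTOR_BY_BASE: the precomputed constant table of Source B, transliterated literally
def pvSectorByBase : PySem.Dict String String := PySem.Dict.ofList [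
  ("TCS", "Information Technology"),
  ("INFY", "Information Technology"),
  ("WIPRO", "Information Technology"),
  ("HCLTECH", "Information Technology"),
  ("TECHM", "Information Technology"),
  ("HDFCBANK", "Banking & Financial Services"),
  ("ICICIBANK", "Banking & Financial Services"),
  ("SBIN", "Banking & Financial Services"),
  ("KOTAKBANK", "Banking & Financial Services"),
  ("AXISBANK", "Banking & Financial Services"),
  ("HDFCLIFE", "Insurance & NBFC"),
  ("SBILIFE", "Insurance & NBFC"),
  ("BAJFINANCE", "Insurance & NBFC"),
  ("BAJAJFINSV", "Insurance & NBFC"),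
  ("SUNPHARMA", "Pharmaceuticals"),
  ("CIPLA", "Pharmaceuticals"),
  ("DIVISLAB", "Pharmaceuticals"),
  ("DRREDDY", "Pharmaceuticals"),
  ("HINDUNILVR", "Consumer Goods (FMCG)"),
  ("ITC", "Consumer Goods (FMCG)"),
  ("NESTLEIND", "Consumer Goods (FMCG)"),
  ("BRITANNIA", "Consumer Goods (FMCG)"),
  ("TATACONSUM", "Consumer Goods (FMCG)"),
  ("MARUTI", "Automobile"),
  ("TATAMOTORS", "Automobile"),
  ("EICHERMOT", "Automobile"),
  ("HEROMOTOCO", "Automobile"),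
  ("BAJAJ-AUTO", "Automobile"),
  ("M&M", "Automobile"),
  ("RELIANCE", "Energy & Oil/Gas"),
  ("ONGC", "Energy & Oil/Gas"),
  ("BPCL", "Energy & Oil/Gas"),
  ("TATASTEEL", "Metals & Mining"),
  ("JSWSTEEL", "Metals & Mining"),
  ("HINDALCO", "Metals & Mining"),
  ("COALINDIA", "Metals & Mining"),
  ("ULTRACEMCO", "Infrastructure & Cement"),
  ("GRASIM", "Infrastructure & Cement"),
  ("ADANIPORTS", "Infrastructure & Cement"),
  ("ADANIENT", "Infrastructure & Cement"),
  ("LT", "Infrastructure & Cement"),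
  ("NTPC", "Power & Utilities"),
  ("POWERGRID", "Power & Utilities"),
  ("BHARTIARTL", "Telecom"),
  ("INDUSINDBK", "Telecom"),
  ("APOLLOHOSP", "Healthcare & Hospitals"),
  ("TITAN", "Consumer & Retail"),
  ("ASIANPAINT", "Consumer & Retail"),
  ("UPL", "Consumer & Retail")
]

def get_ticker_sector_alt (ticker : String) : String :=
  let symbol := PySem.Str.upper (PySem.Str.strip (if ticker == "" then "" else ticker))
  let base_symbol := pvBase symbol
  pvSectorByBase.getD base_symbol "Unknown"

-- ===== PRECONDITION & SPEC =====
def Spec_get_ticker_sector (ticker : String) (out : String) : Prop := out = get_ticker_sector_alt ticker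
instance (ticker : String) (out : String) : Decidable (Spec_get_ticker_sector ticker out) := by unfold Spec_get_ticker_sector; infer_instance

-- ===== CLAIM =====
def Claim_equal_get_ticker_sector : Prop := ∀ (ticker : String), Dom_get_ticker_sector ticker → Spec_get_ticker_sector ticker (get_ticker_sector ticker)

-- ===== LEMMAS AND PROOFS =====

-- base symbol of a map candidate: str(c).strip().upper().split(".")[0]
def pvKey (c : String) : String := pvBase (PySem.Str.upper (PySem.Str.strip c))

-- A's loop, with the per-candidate condition reduced to a base-symbol comparison
def pvLoopAny (base : String) : List (String × List String) → String
  | [] => "Unknown"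
  | (sector, tickers) :: rest =>
      if tickers.any (fun c => base == pvKey c) then sector else pvLoopAny base rest

-- the reverse index A's map induces (first occurrence wins)
def pvReverseMap : PySem.Dict String String :=
  pvSectorMap.foldl
    (fun d p => p.2.foldl (fun d c => d.setdefault (pvKey c) p.1) d)
    PySem.Dict.empty

-- the constant table of Source B is exactly that reverse index
set_option maxRecDepth 8000 in
theorem pv_rev_eq : pvReverseMap = pvSectorByBase := by decide

-- A's condition 'symbol == cand or base == cand.split(".")[0]' collapses to the base
-- comparison, because symbol = cand forces base = pvKey c.
theorem pv_cond_eq (symbol c : String) :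
    (symbol == PySem.Str.upper (PySem.Str.strip c) ||
      pvBase symbol == pvBase (PySem.Str.upper (PySem.Str.strip c)))
    = (pvBase symbol == pvKey c) := by
  by_cases h : symbol = PySem.Str.upper (PySem.Str.strip c)
  · simp [h, pvKey]
  · simp [h, pvKey]

theorem pv_inner_eq (symbol : String) (cs : List String) :
    pvInnerA symbol (pvBase symbol) cs = cs.any (fun c => pvBase symbol == pvKey c) := by
  induction cs with
  | nil => rfl
  | cons c cs ih =>
      simp only [pvInnerA, List.any_cons, pv_cond_eq symbol c]
      by_cases h : (pvBase symbol == pvKey c) = true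
      · simp [h]
      · simp [h, ih]

theorem pv_loopA_eq (symbol : String) (m : List (String × List String)) :
    pvLoopA symbol (pvBase symbol) m = pvLoopAny (pvBase symbol) m := by
  induction m with
  | nil => rfl
  | cons p rest ih =>
      obtain ⟨sector, tickers⟩ := p
      simp only [pvLoopA, pvLoopAny, pv_inner_eq, ih]

theorem pv_fold_sector (base sector : String) (cs : List String) (d : PySem.Dict String String) :
    PySem.Dict.get? (cs.foldl (fun d c => d.setdefault (pvKey c) sector) d) base
      = (PySem.Dict.get? d base).or
          (if cs.any (fun c => base == pvKey c) then some sector else none) := by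
  induction cs generalizing d with
  | nil => cases h : PySem.Dict.get? d base <;> simp [h]
  | cons c cs ih =>
      simp only [List.foldl_cons, ih, List.any_cons]
      by_cases hb : base = pvKey c
      · rw [hb, PySem.Dict.get?_setdefault_self]
        cases PySem.Dict.get? d (pvKey c) <;> simp [Option.or]
      · rw [PySem.Dict.get?_setdefault_of_ne _ _ hb]
        have hf : (base == pvKey c) = false := by simpa using hb
        simp [hf]

theorem pv_fold_map (base : String) (m : List (String × List String)) (d : PySem.Dict String String) :
    PySem.Dict.getD
        (m.foldl (fun d p => p.2.foldl (fun d c => d.setdefault (pvKey c) p.1) d) d)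
        base "Unknown"
      = (PySem.Dict.get? d base).getD (pvLoopAny base m) := by
  induction m generalizing d with
  | nil => simp [pvLoopAny, PySem.Dict.getD_eq_get?_getD]
  | cons p rest ih =>
      obtain ⟨sector, tickers⟩ := p
      simp only [List.foldl_cons, ih, pvLoopAny, pv_fold_sector]
      cases h : PySem.Dict.get? d base with
      | some v => simp [Option.or]
      | none =>
          by_cases ha : tickers.any (fun c => base == pvKey c) = true
          · simp [ha, Option.or]
          · simp [ha, Option.or]

-- ===== VERDICT =====
theorem get_ticker_sector_spec : Claim_equal_get_ticker_sector := by
  intro ticker _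
  unfold Spec_get_ticker_sector get_ticker_sector get_ticker_sector_alt
  simp only []
  rw [pv_loopA_eq, ← pv_rev_eq]
  unfold pvReverseMap
  rw [pv_fold_map]
  simp [PySem.Dict.get?_empty]
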